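-- pv_equiv track=rewrite | github.com/nodesmesta/BIM-Forge | service/app/agents/coordinator_agent.py | _group_spaces_by_floor
-- ===== SOURCE A (Python) =====
-- from typing import Any, Dict, List, Optional, Tuple
--
-- def _group_spaces_by_floor(space_designs: List[Dict]) -> Dict[int, List[Dict]]:
--     floors_dict = {}
--
--     for space in space_designs:
--         floor_num = space["floor_number"]
--         if floor_num not in floors_dict:
--             floors_dict[floor_num] = []
--         floors_dict[floor_num].append(space)
--
--     return floors_dict
-- ===== SOURCE B (Python) =====
-- def _group_spaces_by_floor(space_designs):
--     # Two-pass: collect distinct floors in first-occurrence order, then build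
--     # each group by filtering (no dict bucketing). Same key and element order.
--     order = []
--     for space in space_designs:
--         f = space["floor_number"]
--         if f not in order:
--             order.append(f)
--     return {f: [s for s in space_designs if s["floor_number"] == f] for f in order}
-- ===== Notes on version B (the rewrite author's own statement) =====
-- stated objective: alternative
-- what changed: Replaces incremental dict bucketing by a two-pass scheme: first collect the distinct floor numbers in first-occurrence order, then build each group with a filtering comprehension over the whole list.
import Mathlib
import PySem

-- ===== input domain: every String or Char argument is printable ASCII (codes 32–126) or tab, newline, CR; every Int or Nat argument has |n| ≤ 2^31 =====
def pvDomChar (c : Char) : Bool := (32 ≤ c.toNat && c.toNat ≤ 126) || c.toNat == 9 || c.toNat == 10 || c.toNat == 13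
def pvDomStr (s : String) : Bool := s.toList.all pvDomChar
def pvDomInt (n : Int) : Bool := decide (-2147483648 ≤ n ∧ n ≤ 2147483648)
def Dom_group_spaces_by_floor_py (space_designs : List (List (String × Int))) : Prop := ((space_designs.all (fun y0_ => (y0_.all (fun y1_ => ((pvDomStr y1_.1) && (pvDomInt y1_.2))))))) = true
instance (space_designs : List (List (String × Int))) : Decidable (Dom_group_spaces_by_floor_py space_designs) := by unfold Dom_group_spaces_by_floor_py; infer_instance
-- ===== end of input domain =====

-- ===== PORT A =====
-- B changes the algorithm: distinct floors first, then one filter per floor (alternative, not faster).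
-- shared accessor: space["floor_number"] (first match in the association list; Python dict lookup)
def floorKey (space : List (String × Int)) : Int :=
  match space.find? (fun p => p.1 == "floor_number") with
  | some p => p.2
  | none => 0  -- unreachable under Pre_ (Python raises KeyError there)

def group_spaces_by_floor_py (space_designs : List (List (String × Int))) : List (Int × List (List (String × Int))) :=
  let floors_dict : PySem.Dict Int (List (List (String × Int))) :=
    space_designs.foldl (fun d space =>
      let floor_num := floorKey space
      let d := if d.contains floor_num then d else d.insert floor_num []
      d.modify floor_num [] (fun l => l ++ [space])) PySem.Dict.empty
  floors_dict.items

-- ===== PORT B =====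
def group_spaces_by_floor_py_alt (space_designs : List (List (String × Int))) : List (Int × List (List (String × Int))) :=
  let order : List Int :=
    space_designs.foldl (fun order space =>
      let f := floorKey space
      if f ∈ order then order else order ++ [f]) []
  order.map (fun f => (f, space_designs.filter (fun s => floorKey s == f)))

-- ===== PRECONDITION & SPEC =====
-- Pre_: every space carries the "floor_number" key; on any other input Python A raises KeyError.
def Pre_group_spaces_by_floor_py (space_designs : List (List (String × Int))) : Prop :=
  ∀ s ∈ space_designs, "floor_number" ∈ s.map Prod.fst
instance (space_designs : List (List (String × Int))) : Decidable (Pre_group_spaces_by_floor_py space_designs) := by unfold Pre_group_spaces_by_floor_py; infer_instance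
def pvWitness_group_spaces_by_floor_py : (List (List (String × Int))) :=
  [[("floor_number", 1), ("area", 20)], [("floor_number", 2)], [("floor_number", 1), ("area", 5)]]
def Spec_group_spaces_by_floor_py (space_designs : List (List (String × Int))) (out : List (Int × List (List (String × Int)))) : Prop := out = group_spaces_by_floor_py_alt space_designs
instance (space_designs : List (List (String × Int))) (out : List (Int × List (List (String × Int)))) : Decidable (Spec_group_spaces_by_floor_py space_designs out) := by unfold Spec_group_spaces_by_floor_py; infer_instance

-- ===== CLAIM (what is proved, stated in full; the proofs are below) =====
def Claim_equal_group_spaces_by_floor_py : Prop := ∀ (space_designs : List (List (String × Int))), Dom_group_spaces_by_floor_py space_designs → Pre_group_spaces_by_floor_py space_designs → Spec_group_spaces_by_floor_py space_designs (group_spaces_by_floor_py space_designs)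

-- ===== LEMMAS AND PROOFS =====

-- A's loop body ("ensure key, then append") is exactly a modify with default [].
theorem stepA_eq_modify (d : PySem.Dict Int (List (List (String × Int)))) (space : List (String × Int)) :
    (let floor_num := floorKey space
     let d := if d.contains floor_num then d else d.insert floor_num []
     d.modify floor_num [] (fun l => l ++ [space]))
    = d.modify (floorKey space) [] (fun l => l ++ [space]) := by
  by_cases h : d.contains (floorKey space)
  · simp [h]
  · have hc : d.contains (floorKey space) = false := by simpa using h
    simp only [hc, Bool.false_eq_true, if_false, PySem.Dict.modify,
      PySem.Dict.getD_insert_self, PySem.Dict.insert_insert_self,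
      PySem.Dict.getD_of_not_contains d [] hc]

theorem group_spaces_by_floor_py_spec : Claim_equal_group_spaces_by_floor_py := by
  intro spaces _ _
  unfold Spec_group_spaces_by_floor_py group_spaces_by_floor_py group_spaces_by_floor_py_alt
  simp only [stepA_eq_modify]
  -- B's first loop is Set.ofList of the floor keys
  have horder : (spaces.foldl (fun order space =>
      if floorKey space ∈ order then order else order ++ [floorKey space]) [])
      = PySem.Set.ofList (spaces.map floorKey) := by
    rw [← PySem.Set.update_nil_left, PySem.Set.update_map_eq_foldl_add]
    simp only [PySem.Set.add_eq_ite]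
  rw [horder]
  -- A's fold, rewritten to the canonical modify loop
  set D := spaces.foldl (fun d space => d.modify (floorKey space) [] (fun l => l ++ [space]))
    PySem.Dict.empty with hD
  have hkeys : D.keys = PySem.Set.ofList (spaces.map floorKey) := by
    rw [hD, PySem.Dict.keys_foldl_modify_key spaces floorKey [] (fun _ s => fun l => l ++ [s])]
    simp [PySem.Set.update_nil_left]
  have hnodup : D.keys.Nodup := by
    rw [hkeys]; exact PySem.Set.nodup_ofList _
  have hgetD : ∀ c : Int, D.getD c [] = spaces.filter (fun s => floorKey s == c) := by
    intro c
    have hfold : (spaces.foldl (fun d space => d.modify (floorKey space) [] (fun l => l ++ [space]))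
        (PySem.Dict.empty : PySem.Dict Int (List (List (String × Int)))))
        = (spaces.map (fun s => (floorKey s, s))).foldl
            (fun d p => d.modify p.1 [] (fun l => l ++ [p.2])) PySem.Dict.empty :=
      (List.foldl_map (f := fun s : List (String × Int) => (floorKey s, s))
        (g := fun (d : PySem.Dict Int (List (List (String × Int)))) p =>
          d.modify p.1 [] (fun l => l ++ [p.2]))
        (l := spaces) (init := PySem.Dict.empty)).symm
    rw [hD, hfold, PySem.Dict.getD_foldl_modify_append]
    rw [List.filter_map]
    simp [Function.comp_def]
  rw [PySem.Dict.items_eq_map_keys D hnodup [], hkeys]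
  exact List.map_congr_left (fun k _ => by rw [hgetD k])
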